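-- pv_equiv track=rewrite | github.com/Whitecki/ASD | Dynamiki/MIT/Splits Bowling.py | niby_trudniejsze_ale_w_sumie_latwe_kregle
-- ===== SOURCE A (Python) =====
-- def niby_trudniejsze_ale_w_sumie_latwe_kregle(T):
--     n = len(T)
--
--     # maxi(i,j) - maksymalne zbicie wszystkich kręgli pomiędzy i oraz j włącznie
--     maxi = [[0 if i != j and i + 1 != j else T[i] if i == j else max(T[i],T[j],T[i]*T[j]) for j in range(n)] for i in range(n)]
--     for length in range(2,n):
--         for start in range(n-length):
--             for k in range(start,start+length):
--                 maxi[start][start+length] = max(maxi[start][k]+maxi[k+1][start+length],T[start]*T[start+length]+maxi[start+1][start+length-1],maxi[start][start+length])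
--
--     #niepotrzebne
--     # dp = [0 for _ in range(n)]
--     # dp[0],dp[1] = max(T[0],0), max(T[0],T[1],0,T[0]*T[1])
--     # for i in range(2,n):
--     #     dp[i] = max(dp[i-1],dp[i-1]+T[i],dp[i-2]+T[i-1]*T[i])
--     #     for k in range(1,i):
--     #         if i-1 >= k + 1:
--     #             dp[i] = max(dp[i],dp[k-1] + T[k]*T[i] + maxi[k+1][i-1])
--     return maxi[0][n-1]
-- ===== SOURCE B (Python) =====
-- def niby_trudniejsze_ale_w_sumie_latwe_kregle(T):
--     n = len(T)
--     memo = [[None] * n for _ in range(n)]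
--
--     def best(i, j):
--         if i == j:
--             return T[i]
--         if j == i + 1:
--             return max(T[i], T[j], T[i] * T[j])
--         r = memo[i][j]
--         if r is None:
--             r = T[i] * T[j] + best(i + 1, j - 1)
--             for k in range(i, j):
--                 s = best(i, k) + best(k + 1, j)
--                 if s > r:
--                     r = s
--             memo[i][j] = r
--         return r
--
--     return best(0, n - 1)
-- ===== Notes on version B (the rewrite author's own statement) =====
-- stated objective: alternative
-- what changed: replaces the bottom-up triple loop over an n×n DP table (in-place max updates starting from the table's 0 initialisation) by a top-down memoized recursion best(i,j) over intervals whose running max starts from the pair term, with no spurious 0 candidate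
import Mathlib
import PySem

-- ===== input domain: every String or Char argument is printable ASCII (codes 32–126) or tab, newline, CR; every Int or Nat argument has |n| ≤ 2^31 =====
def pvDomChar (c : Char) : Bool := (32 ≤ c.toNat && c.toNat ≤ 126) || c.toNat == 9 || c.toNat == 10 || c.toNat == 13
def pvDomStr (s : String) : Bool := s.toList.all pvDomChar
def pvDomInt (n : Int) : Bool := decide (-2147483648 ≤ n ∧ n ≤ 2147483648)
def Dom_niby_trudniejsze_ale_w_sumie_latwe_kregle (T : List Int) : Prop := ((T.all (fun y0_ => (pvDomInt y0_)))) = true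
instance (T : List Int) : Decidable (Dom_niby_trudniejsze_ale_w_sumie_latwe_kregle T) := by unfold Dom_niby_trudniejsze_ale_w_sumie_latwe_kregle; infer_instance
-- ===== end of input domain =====

-- B replaces A's bottom-up triple-loop interval-DP table by a top-down memoized recursion over
-- intervals (same O(n^3) cost, different decomposition); proved equal on every non-empty list.

-- ===== PORT A =====
-- Python indexes maxi[i][j] / T[i] always in range on Pre_ (T nonempty), so getD is exact here;
-- the returned maxi[0][-1] equals maxi[0][n-1] for n ≥ 1.
def pvGet2 (m : List (List Int)) (i j : Nat) : Int := (m.getD i []).getD j 0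

def pvSet2 (m : List (List Int)) (i j : Nat) (v : Int) : List (List Int) :=
  m.set i ((m.getD i []).set j v)

def niby_trudniejsze_ale_w_sumie_latwe_kregle (T : List Int) : Int :=
  let n := T.length
  let maxi0 := (List.range n).map (fun i => (List.range n).map (fun j =>
    if i ≠ j ∧ i + 1 ≠ j then 0
    else if i = j then T.getD i 0
    else max (max (T.getD i 0) (T.getD j 0)) (T.getD i 0 * T.getD j 0)))
  let maxi := (List.range' 2 (n - 2)).foldl (fun m len =>
    (List.range (n - len)).foldl (fun m start =>
      (List.range' start len).foldl (fun m k =>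
        pvSet2 m start (start + len)
          (max (max (pvGet2 m start k + pvGet2 m (k + 1) (start + len))
                    (T.getD start 0 * T.getD (start + len) 0 + pvGet2 m (start + 1) (start + len - 1)))
               (pvGet2 m start (start + len)))) m) m) maxi0
  pvGet2 maxi 0 (n - 1)

-- ===== PORT B =====
-- best(i,j) from Source B; the memo dict is a pure-speed cache, so the port is the plain recursion,
-- made structural with a fuel argument (fuel ≥ j-i+1 suffices; the wrapper passes len T).
def pvBest (T : List Int) : Nat → Nat → Nat → Int
  | 0, _, _ => 0
  | f + 1, i, j =>
    if i = j then T.getD i 0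
    else if j = i + 1 then max (max (T.getD i 0) (T.getD j 0)) (T.getD i 0 * T.getD j 0)
    else (List.range' i (j - i)).foldl
        (fun acc k => max acc (pvBest T f i k + pvBest T f (k + 1) j))
        (T.getD i 0 * T.getD j 0 + pvBest T f (i + 1) (j - 1))

def niby_trudniejsze_ale_w_sumie_latwe_kregle_alt (T : List Int) : Int :=
  pvBest T T.length 0 (T.length - 1)

-- ===== PRECONDITION & SPEC =====
-- On the empty list A raises IndexError (maxi[0][-1] on an empty table), and B's best(0,-1)
-- raises IndexError too; Pre_ excludes exactly that input.
def Pre_niby_trudniejsze_ale_w_sumie_latwe_kregle (T : List Int) : Prop := T ≠ []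
instance (T : List Int) : Decidable (Pre_niby_trudniejsze_ale_w_sumie_latwe_kregle T) := by unfold Pre_niby_trudniejsze_ale_w_sumie_latwe_kregle; infer_instance

def pvWitness_niby_trudniejsze_ale_w_sumie_latwe_kregle : List Int := [3, -1, 4, -2]

def Spec_niby_trudniejsze_ale_w_sumie_latwe_kregle (T : List Int) (out : Int) : Prop := out = niby_trudniejsze_ale_w_sumie_latwe_kregle_alt T
instance (T : List Int) (out : Int) : Decidable (Spec_niby_trudniejsze_ale_w_sumie_latwe_kregle T out) := by unfold Spec_niby_trudniejsze_ale_w_sumie_latwe_kregle; infer_instance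

-- ===== CLAIM (what is proved, stated in full; the proofs are below) =====
def Claim_equal_niby_trudniejsze_ale_w_sumie_latwe_kregle : Prop := ∀ (T : List Int), Dom_niby_trudniejsze_ale_w_sumie_latwe_kregle T → Pre_niby_trudniejsze_ale_w_sumie_latwe_kregle T → Spec_niby_trudniejsze_ale_w_sumie_latwe_kregle T (niby_trudniejsze_ale_w_sumie_latwe_kregle T)

-- ===== LEMMAS AND PROOFS =====

-- ---- generic max-fold lemmas ----
theorem pvFmInit (l : List Int) (a : Int) : a ≤ l.foldl max a := by
  induction l generalizing a with
  | nil => exact le_refl a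
  | cons x t ih => exact le_trans (le_max_left a x) (ih (max a x))

theorem pvFmMem (l : List Int) (a x : Int) (hx : x ∈ l) : x ≤ l.foldl max a := by
  induction l generalizing a with
  | nil => cases hx
  | cons y t ih =>
    rcases List.mem_cons.mp hx with h | h
    · subst h; exact le_trans (le_max_right a x) (pvFmInit t _)
    · exact ih _ h

theorem pvFmMaxInit (l : List Int) (a b : Int) :
    l.foldl max (max a b) = max a (l.foldl max b) := by
  induction l generalizing b with
  | nil => rfl
  | cons x t ih =>
    simp only [List.foldl_cons]
    rw [max_assoc, ih]

-- A's inner-loop shape, folded from 0, equals max a (max-fold of the candidates from P).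
theorem pvFoldAEq (s : Nat → Int) (P : Int) (l : List Nat) (a : Int) (hl : l ≠ []) :
    l.foldl (fun acc k => max (max (s k) P) acc) a
      = max a ((l.map s).foldl max P) := by
  induction l generalizing a with
  | nil => exact absurd rfl hl
  | cons x t ih =>
    rcases eq_or_ne t [] with ht | ht
    · subst ht
      simp only [List.foldl_cons, List.foldl_nil, List.map_cons, List.map_nil]
      omega
    · simp only [List.foldl_cons, List.map_cons]
      rw [ih _ ht]
      have h1 : P ≤ (t.map s).foldl max P := pvFmInit _ _
      have h2 : (t.map s).foldl max (max P (s x)) = max (s x) ((t.map s).foldl max P) := by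
        rw [max_comm P (s x), pvFmMaxInit]
      rw [h2]; omega

-- ---- arithmetic facts ----
theorem pvPmaxNonneg (a b : Int) : 0 ≤ max (max a b) (a * b) := by
  by_cases h : (0 : Int) ≤ a
  · exact le_max_of_le_left (le_max_of_le_left h)
  · by_cases h2 : (0 : Int) ≤ b
    · exact le_max_of_le_left (le_max_of_le_right h2)
    · exact le_max_of_le_right
        (le_of_lt (mul_pos_of_neg_of_neg (by omega) (by omega)))

theorem pvThreeNonneg (a b c : Int) :
    0 ≤ max (max (a * c + b) (a + max (max b c) (b * c))) (max (max a b) (a * b) + c) := by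
  by_contra h
  rw [not_le] at h
  have h1 : a * c + b < 0 := lt_of_le_of_lt (le_max_left _ _) (lt_of_le_of_lt (le_max_left _ _) h)
  have h2 : a + max (max b c) (b * c) < 0 :=
    lt_of_le_of_lt (le_max_right _ _) (lt_of_le_of_lt (le_max_left _ _) h)
  have h3 : max (max a b) (a * b) + c < 0 := lt_of_le_of_lt (le_max_right _ _) h
  have ha : a < 0 := by have := pvPmaxNonneg b c; omega
  have hc : c < 0 := by have := pvPmaxNonneg a b; omega
  have hb : b < 0 := by nlinarith
  have hbc : a + b * c < 0 := by
    have : b * c ≤ max (max b c) (b * c) := le_max_right _ _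
    omega
  have hab : a * b + c < 0 := by
    have : a * b ≤ max (max a b) (a * b) := le_max_right _ _
    omega
  nlinarith

-- ---- fuel lemmas for pvBest ----
theorem pvBestFuel (T : List Int) (f g i j : Nat) (hij0 : i ≤ j) (hf : j - i < f) (hg : j - i < g) :
    pvBest T f i j = pvBest T g i j := by
  induction f generalizing g i j with
  | zero => omega
  | succ f ih =>
    cases g with
    | zero => omega
    | succ g =>
      by_cases hij : i = j
      · simp [pvBest, hij]
      · by_cases hij1 : j = i + 1
        · simp [pvBest, hij1]
        · have h2 : i + 2 ≤ j := by omega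
          simp only [pvBest, if_neg hij, if_neg hij1]
          rw [ih (i + 1) (j - 1) (g := g) (by omega) (by omega) (by omega)]
          apply List.foldl_ext
          intro acc k hk
          have hk' := List.mem_range'_1.mp hk
          rw [ih i k (g := g) (by omega) (by omega) (by omega),
            ih (k + 1) j (g := g) (by omega) (by omega) (by omega)]

theorem pvBestNonneg (T : List Int) (f i j : Nat) (hij : i < j) (hf : j - i < f) :
    0 ≤ pvBest T f i j := by
  induction f generalizing i j with
  | zero => omega
  | succ f ih =>
    by_cases hij1 : j = i + 1
    · simp only [pvBest, if_neg (by omega : ¬ i = j), if_pos hij1]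
      exact pvPmaxNonneg _ _
    · have h2 : i + 2 ≤ j := by omega
      simp only [pvBest, if_neg (by omega : ¬ i = j), if_neg hij1]
      by_cases hd : j = i + 2
      · subst hd
        obtain ⟨f, rfl⟩ : ∃ m, f = m + 1 := ⟨f - 1, by omega⟩
        have hr : List.range' i (i + 2 - i) = [i, i + 1] := by
          norm_num [List.range'_succ]
        rw [hr]
        simp only [List.foldl_cons, List.foldl_nil]
        have e1 : pvBest T (f + 1) (i + 1) (i + 2 - 1) = T.getD (i + 1) 0 := by
          simp [pvBest, (by omega : i + 2 - 1 = i + 1)]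
        have e2 : pvBest T (f + 1) i i = T.getD i 0 := by simp [pvBest]
        have e3 : pvBest T (f + 1) (i + 1) (i + 2) =
            max (max (T.getD (i + 1) 0) (T.getD (i + 2) 0)) (T.getD (i + 1) 0 * T.getD (i + 2) 0) := by
          simp [pvBest]
        have e4 : pvBest T (f + 1) i (i + 1) =
            max (max (T.getD i 0) (T.getD (i + 1) 0)) (T.getD i 0 * T.getD (i + 1) 0) := by
          simp [pvBest]
        have e5 : pvBest T (f + 1) (i + 2) (i + 2) = T.getD (i + 2) 0 := by simp [pvBest]
        rw [e1, e2, e3, e4, e5]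
        have h3 := pvThreeNonneg (T.getD i 0) (T.getD (i + 1) 0) (T.getD (i + 2) 0)
        omega
      · -- j ≥ i + 3 : the split at k = i+1 is a pair plus a shorter interval, both ≥ 0 by ih
        have hmem : (i + 1) ∈ List.range' i (j - i) := List.mem_range'_1.mpr (by omega)
        have hcand : pvBest T f i (i + 1) + pvBest T f (i + 2) j ≤
            (List.range' i (j - i)).foldl
              (fun acc k => max acc (pvBest T f i k + pvBest T f (k + 1) j))
              (T.getD i 0 * T.getD j 0 + pvBest T f (i + 1) (j - 1)) := by
          rw [show (fun acc k => max acc (pvBest T f i k + pvBest T f (k + 1) j))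
                = (fun acc k => max acc ((fun k => pvBest T f i k + pvBest T f (k + 1) j) k)) from rfl,
            ← List.foldl_map]
          exact pvFmMem _ _ _ (List.mem_map_of_mem hmem)
        have hp : 0 ≤ pvBest T f i (i + 1) := ih i (i + 1) (by omega) (by omega)
        have hq : 0 ≤ pvBest T f (i + 2) j := ih (i + 2) j (by omega) (by omega)
        omega

-- A's inner-loop fold (init 0, candidates read at already-final entries = pvBest at big fuel)
-- produces exactly pvBest.
theorem pvFoldABest (T : List Int) (n i j : Nat) (h2 : i + 2 ≤ j) (hj : j - i < n) :
    (List.range' i (j - i)).foldl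
        (fun m k => max (max (pvBest T n i k + pvBest T n (k + 1) j)
            (T.getD i 0 * T.getD j 0 + pvBest T n (i + 1) (j - 1))) m) 0
      = pvBest T n i j := by
  obtain ⟨f, rfl⟩ : ∃ m, n = m + 1 := ⟨n - 1, by omega⟩
  have hne : List.range' i (j - i) ≠ [] := by
    simp [List.range'_eq_nil_iff]; omega
  -- convert the fuel of every leaf from f+1 to f
  have hleaf : ∀ k ∈ List.range' i (j - i),
      pvBest T (f + 1) i k + pvBest T (f + 1) (k + 1) j
        = pvBest T f i k + pvBest T f (k + 1) j := by
    intro k hk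
    have hk' := List.mem_range'_1.mp hk
    rw [pvBestFuel T (f + 1) f i k (by omega) (by omega) (by omega),
      pvBestFuel T (f + 1) f (k + 1) j (by omega) (by omega) (by omega)]
  have hinner : pvBest T (f + 1) (i + 1) (j - 1) = pvBest T f (i + 1) (j - 1) :=
    pvBestFuel T (f + 1) f (i + 1) (j - 1) (by omega) (by omega) (by omega)
  have hstep : (List.range' i (j - i)).foldl
      (fun m k => max (max (pvBest T (f + 1) i k + pvBest T (f + 1) (k + 1) j)
          (T.getD i 0 * T.getD j 0 + pvBest T (f + 1) (i + 1) (j - 1))) m) 0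
      = (List.range' i (j - i)).foldl
      (fun m k => max (max (pvBest T f i k + pvBest T f (k + 1) j)
          (T.getD i 0 * T.getD j 0 + pvBest T f (i + 1) (j - 1))) m) 0 := by
    apply List.foldl_ext
    intro acc k hk
    rw [hleaf k hk, hinner]
  rw [hstep,
    pvFoldAEq (fun k => pvBest T f i k + pvBest T f (k + 1) j)
      (T.getD i 0 * T.getD j 0 + pvBest T f (i + 1) (j - 1)) _ 0 hne]
  have hBval : pvBest T (f + 1) i j
      = ((List.range' i (j - i)).map (fun k => pvBest T f i k + pvBest T f (k + 1) j)).foldl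
          max (T.getD i 0 * T.getD j 0 + pvBest T f (i + 1) (j - 1)) := by
    simp only [pvBest, if_neg (by omega : ¬ i = j), if_neg (by omega : ¬ j = i + 1)]
    rw [← List.foldl_map]
  rw [← hBval]
  have := pvBestNonneg T (f + 1) i j (by omega) (by omega)
  omega

-- ---- table infrastructure ----
def pvTW (n : Nat) (m : List (List Int)) : Prop := m.length = n ∧ ∀ r ∈ m, r.length = n

theorem pvGetDSetSelf {α : Type} (l : List α) (i : Nat) (r d : α) (hi : i < l.length) :
    (l.set i r).getD i d = r := by
  rw [List.getD_eq_getElem?_getD, List.getElem?_set_self hi]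
  rfl

theorem pvGetDSetNe {α : Type} (l : List α) (i i' : Nat) (r d : α) (hii : i ≠ i') :
    (l.set i r).getD i' d = l.getD i' d := by
  rw [List.getD_eq_getElem?_getD, List.getElem?_set_ne hii, ← List.getD_eq_getElem?_getD]

theorem pvGetDMapRange {α : Type} (f : Nat → α) (n i : Nat) (d : α) (hi : i < n) :
    ((List.range n).map f).getD i d = f i := by
  rw [List.getD_eq_getElem?_getD, List.getElem?_map, List.getElem?_range hi]
  rfl

theorem pvRowLen (n : Nat) (m : List (List Int)) (i : Nat) (h : pvTW n m) (hi : i < n) :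
    (m.getD i []).length = n := by
  have hl : m.length = n := h.1
  have hg : m.getD i [] = m[i]'(by omega) := by
    rw [List.getD_eq_getElem?_getD, List.getElem?_eq_getElem (by omega : i < m.length)]
    rfl
  rw [hg]
  exact h.2 _ (List.getElem_mem _)

theorem pvTWSet (n : Nat) (m : List (List Int)) (i j : Nat) (v : Int) (h : pvTW n m)
    (hi : i < n) : pvTW n (pvSet2 m i j v) := by
  refine ⟨by simp [pvSet2, h.1], ?_⟩
  intro r hrm
  rcases List.mem_or_eq_of_mem_set hrm with h' | h'
  · exact h.2 r h'
  · subst h'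
    rw [List.length_set]
    exact pvRowLen n m i h hi

theorem pvGet2Set2Same (n : Nat) (m : List (List Int)) (i j : Nat) (v : Int)
    (h : pvTW n m) (hi : i < n) (hj : j < n) :
    pvGet2 (pvSet2 m i j v) i j = v := by
  have hl : m.length = n := h.1
  have hrow := pvRowLen n m i h hi
  unfold pvGet2 pvSet2
  rw [pvGetDSetSelf m i _ _ (by omega), pvGetDSetSelf _ j _ _ (by omega)]

theorem pvGet2Set2Ne (m : List (List Int)) (i j i' j' : Nat) (v : Int)
    (hne : i ≠ i' ∨ j ≠ j') :
    pvGet2 (pvSet2 m i j v) i' j' = pvGet2 m i' j' := by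
  unfold pvGet2 pvSet2
  by_cases hii : i = i'
  · subst hii
    have hjj : j ≠ j' := by tauto
    by_cases hlen : i < m.length
    · rw [pvGetDSetSelf m i _ _ hlen, pvGetDSetNe _ j j' _ _ hjj]
    · rw [List.set_eq_of_length_le (by omega)]
  · rw [pvGetDSetNe m i i' _ _ hii]

-- pvBest on trivial intervals, any positive fuel
theorem pvBestDiag (T : List Int) (f i : Nat) (hf : 1 ≤ f) :
    pvBest T f i i = T.getD i 0 := by
  obtain ⟨m, rfl⟩ : ∃ m, f = m + 1 := ⟨f - 1, by omega⟩
  simp [pvBest]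

theorem pvBestPair (T : List Int) (f i : Nat) (hf : 1 ≤ f) :
    pvBest T f i (i + 1)
      = max (max (T.getD i 0) (T.getD (i + 1) 0)) (T.getD i 0 * T.getD (i + 1) 0) := by
  obtain ⟨m, rfl⟩ : ∃ m, f = m + 1 := ⟨f - 1, by omega⟩
  simp [pvBest]

-- expected table contents after the lengths < L have been processed and, within length L,
-- the starts < s have been processed
def pvExpM (T : List Int) (n L s i j : Nat) : Int :=
  if i ≤ j ∧ (j - i < L ∨ (j - i = L ∧ i < s)) then pvBest T n i j else 0

theorem pvExpM_def (T : List Int) (n L s i j : Nat) :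
    pvExpM T n L s i j
      = if i ≤ j ∧ (j - i < L ∨ (j - i = L ∧ i < s)) then pvBest T n i j else 0 := rfl

theorem pvInitTW (T : List Int) (n : Nat) :
    pvTW n ((List.range n).map (fun i => (List.range n).map (fun j =>
      if i ≠ j ∧ i + 1 ≠ j then 0
      else if i = j then T.getD i 0
      else max (max (T.getD i 0) (T.getD j 0)) (T.getD i 0 * T.getD j 0)))) := by
  constructor
  · simp
  · intro r hr
    simp only [List.mem_map] at hr
    obtain ⟨i, _, rfl⟩ := hr
    simp

theorem pvInit (T : List Int) (n : Nat) (hn1 : 1 ≤ n) (i j : Nat)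
    (hi : i < n) (hj : j < n) :
    pvGet2 ((List.range n).map (fun i => (List.range n).map (fun j =>
      if i ≠ j ∧ i + 1 ≠ j then 0
      else if i = j then T.getD i 0
      else max (max (T.getD i 0) (T.getD j 0)) (T.getD i 0 * T.getD j 0)))) i j
      = pvExpM T n 2 0 i j := by
  unfold pvGet2
  rw [pvGetDMapRange _ n i _ hi, pvGetDMapRange _ n j _ hj]
  unfold pvExpM
  by_cases hij : i = j
  · subst hij
    rw [if_neg (by omega), if_pos rfl, if_pos (by omega), pvBestDiag T n i hn1]
  · by_cases hij1 : j = i + 1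
    · subst hij1
      rw [if_neg (by omega), if_neg hij, if_pos (by omega), pvBestPair T n i hn1]
    · rw [if_pos (by omega), if_neg (by omega)]

-- one pass of the innermost k-loop, processing k ∈ [k0, k0+c)
theorem pvInnerAux (T : List Int) (n L s : Nat)
    (hL : 2 ≤ L) (hLn : L + 1 ≤ n) (hs : s < n - L) :
    ∀ (c k0 : Nat) (m : List (List Int)), s ≤ k0 → k0 + c ≤ s + L → pvTW n m →
    (∀ i j, i < n → j < n → ¬(i = s ∧ j = s + L) → pvGet2 m i j = pvExpM T n L s i j) →
    (pvTW n ((List.range' k0 c).foldl (fun m k =>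
        pvSet2 m s (s + L)
          (max (max (pvGet2 m s k + pvGet2 m (k + 1) (s + L))
                    (T.getD s 0 * T.getD (s + L) 0 + pvGet2 m (s + 1) (s + L - 1)))
               (pvGet2 m s (s + L)))) m)
     ∧ (∀ i j, i < n → j < n → ¬(i = s ∧ j = s + L) →
        pvGet2 ((List.range' k0 c).foldl (fun m k =>
          pvSet2 m s (s + L)
            (max (max (pvGet2 m s k + pvGet2 m (k + 1) (s + L))
                      (T.getD s 0 * T.getD (s + L) 0 + pvGet2 m (s + 1) (s + L - 1)))
                 (pvGet2 m s (s + L)))) m) i j = pvExpM T n L s i j)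
     ∧ pvGet2 ((List.range' k0 c).foldl (fun m k =>
          pvSet2 m s (s + L)
            (max (max (pvGet2 m s k + pvGet2 m (k + 1) (s + L))
                      (T.getD s 0 * T.getD (s + L) 0 + pvGet2 m (s + 1) (s + L - 1)))
                 (pvGet2 m s (s + L)))) m) s (s + L)
        = (List.range' k0 c).foldl (fun acc k =>
            max (max (pvBest T n s k + pvBest T n (k + 1) (s + L))
                     (T.getD s 0 * T.getD (s + L) 0 + pvBest T n (s + 1) (s + L - 1))) acc)
            (pvGet2 m s (s + L))) := by
  intro c
  induction c with
  | zero =>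
    intro k0 m _ _ hTW hm
    exact ⟨hTW, hm, rfl⟩
  | succ c ih =>
    intro k0 m hk0 hkc hTW hm
    rw [List.range'_succ]
    simp only [List.foldl_cons]
    -- the three reads of this step are already-final entries
    have hr1 : pvGet2 m s k0 = pvBest T n s k0 := by
      rw [hm s k0 (by omega) (by omega) (by omega), pvExpM_def, if_pos (by omega)]
    have hr2 : pvGet2 m (k0 + 1) (s + L) = pvBest T n (k0 + 1) (s + L) := by
      rw [hm (k0 + 1) (s + L) (by omega) (by omega) (by omega), pvExpM_def, if_pos (by omega)]
    have hr3 : pvGet2 m (s + 1) (s + L - 1) = pvBest T n (s + 1) (s + L - 1) := by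
      rw [hm (s + 1) (s + L - 1) (by omega) (by omega) (by omega), pvExpM_def, if_pos (by omega)]
    set v := max (max (pvGet2 m s k0 + pvGet2 m (k0 + 1) (s + L))
        (T.getD s 0 * T.getD (s + L) 0 + pvGet2 m (s + 1) (s + L - 1)))
        (pvGet2 m s (s + L)) with hv
    have hTW1 : pvTW n (pvSet2 m s (s + L) v) := pvTWSet n m s (s + L) v hTW (by omega)
    have hm1 : ∀ i j, i < n → j < n → ¬(i = s ∧ j = s + L) →
        pvGet2 (pvSet2 m s (s + L) v) i j = pvExpM T n L s i j := by
      intro i j hi hj hij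
      rw [pvGet2Set2Ne m s (s + L) i j v (by tauto), hm i j hi hj hij]
    have hacc : pvGet2 (pvSet2 m s (s + L) v) s (s + L) = v :=
      pvGet2Set2Same n m s (s + L) v hTW (by omega) (by omega)
    obtain ⟨hA, hB, hC⟩ := ih (k0 + 1) (pvSet2 m s (s + L) v) (by omega) (by omega) hTW1 hm1
    refine ⟨hA, hB, ?_⟩
    rw [hC, hacc, hv, hr1, hr2, hr3]

theorem pvInner (T : List Int) (n L s : Nat) (m : List (List Int))
    (hL : 2 ≤ L) (hLn : L + 1 ≤ n) (hs : s < n - L)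
    (hTW : pvTW n m)
    (hm : ∀ i j, i < n → j < n → pvGet2 m i j = pvExpM T n L s i j) :
    pvTW n ((List.range' s L).foldl (fun m k =>
        pvSet2 m s (s + L)
          (max (max (pvGet2 m s k + pvGet2 m (k + 1) (s + L))
                    (T.getD s 0 * T.getD (s + L) 0 + pvGet2 m (s + 1) (s + L - 1)))
               (pvGet2 m s (s + L)))) m)
    ∧ ∀ i j, i < n → j < n →
      pvGet2 ((List.range' s L).foldl (fun m k =>
        pvSet2 m s (s + L)
          (max (max (pvGet2 m s k + pvGet2 m (k + 1) (s + L))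
                    (T.getD s 0 * T.getD (s + L) 0 + pvGet2 m (s + 1) (s + L - 1)))
               (pvGet2 m s (s + L)))) m) i j = pvExpM T n L (s + 1) i j := by
  obtain ⟨hA, hB, hC⟩ := pvInnerAux T n L s hL hLn hs L s m (le_refl s) (by omega) hTW
    (fun i j hi hj _ => hm i j hi hj)
  have hzero : pvGet2 m s (s + L) = 0 := by
    rw [hm s (s + L) (by omega) (by omega), pvExpM_def, if_neg (by omega)]
  have hfin : pvGet2 ((List.range' s L).foldl (fun m k =>
      pvSet2 m s (s + L)
        (max (max (pvGet2 m s k + pvGet2 m (k + 1) (s + L))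
                  (T.getD s 0 * T.getD (s + L) 0 + pvGet2 m (s + 1) (s + L - 1)))
             (pvGet2 m s (s + L)))) m) s (s + L) = pvBest T n s (s + L) := by
    rw [hC, hzero]
    have := pvFoldABest T n s (s + L) (by omega) (by omega)
    rw [show s + L - s = L from by omega] at this
    exact this
  refine ⟨hA, ?_⟩
  intro i j hi hj
  by_cases hij : i = s ∧ j = s + L
  · obtain ⟨rfl, rfl⟩ := hij
    rw [hfin, pvExpM_def, if_pos (by omega)]
  · rw [hB i j hi hj hij]
    unfold pvExpM
    rcases not_and_or.mp hij with h | h <;>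
      · split_ifs with h1 h2 <;> first | rfl | omega

theorem pvMiddleAux (T : List Int) (n L : Nat) (hL : 2 ≤ L) (hLn : L + 1 ≤ n) :
    ∀ (c s : Nat) (m : List (List Int)), s + c ≤ n - L → pvTW n m →
    (∀ i j, i < n → j < n → pvGet2 m i j = pvExpM T n L s i j) →
    pvTW n ((List.range' s c).foldl (fun m start =>
        (List.range' start L).foldl (fun m k =>
          pvSet2 m start (start + L)
            (max (max (pvGet2 m start k + pvGet2 m (k + 1) (start + L))
                      (T.getD start 0 * T.getD (start + L) 0 + pvGet2 m (start + 1) (start + L - 1)))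
                 (pvGet2 m start (start + L)))) m) m)
    ∧ ∀ i j, i < n → j < n →
      pvGet2 ((List.range' s c).foldl (fun m start =>
        (List.range' start L).foldl (fun m k =>
          pvSet2 m start (start + L)
            (max (max (pvGet2 m start k + pvGet2 m (k + 1) (start + L))
                      (T.getD start 0 * T.getD (start + L) 0 + pvGet2 m (start + 1) (start + L - 1)))
                 (pvGet2 m start (start + L)))) m) m) i j = pvExpM T n L (s + c) i j := by
  intro c
  induction c with
  | zero =>
    intro s m _ hTW hm
    exact ⟨hTW, hm⟩
  | succ c ih =>
    intro s m hsc hTW hm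
    rw [List.range'_succ]
    simp only [List.foldl_cons]
    obtain ⟨hTW1, hm1⟩ := pvInner T n L s m hL hLn (by omega) hTW hm
    have := ih (s + 1) _ (by omega) hTW1 hm1
    rw [show s + 1 + c = s + (c + 1) from by omega] at this
    exact this

theorem pvMiddle (T : List Int) (n L : Nat) (m : List (List Int))
    (hL : 2 ≤ L) (hLn : L + 1 ≤ n)
    (hTW : pvTW n m)
    (hm : ∀ i j, i < n → j < n → pvGet2 m i j = pvExpM T n L 0 i j) :
    pvTW n ((List.range (n - L)).foldl (fun m start =>
        (List.range' start L).foldl (fun m k =>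
          pvSet2 m start (start + L)
            (max (max (pvGet2 m start k + pvGet2 m (k + 1) (start + L))
                      (T.getD start 0 * T.getD (start + L) 0 + pvGet2 m (start + 1) (start + L - 1)))
                 (pvGet2 m start (start + L)))) m) m)
    ∧ ∀ i j, i < n → j < n →
      pvGet2 ((List.range (n - L)).foldl (fun m start =>
        (List.range' start L).foldl (fun m k =>
          pvSet2 m start (start + L)
            (max (max (pvGet2 m start k + pvGet2 m (k + 1) (start + L))
                      (T.getD start 0 * T.getD (start + L) 0 + pvGet2 m (start + 1) (start + L - 1)))
                 (pvGet2 m start (start + L)))) m) m) i j = pvExpM T n (L + 1) 0 i j := by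
  rw [List.range_eq_range']
  obtain ⟨hA, hB⟩ := pvMiddleAux T n L hL hLn (n - L) 0 m (by omega) hTW hm
  refine ⟨hA, ?_⟩
  intro i j hi hj
  rw [hB i j hi hj]
  unfold pvExpM
  split_ifs with h1 h2 <;> first | rfl | omega

theorem pvOuterAux (T : List Int) (n : Nat) :
    ∀ (c L : Nat) (m : List (List Int)), 2 ≤ L → L + c ≤ n → pvTW n m →
    (∀ i j, i < n → j < n → pvGet2 m i j = pvExpM T n L 0 i j) →
    pvTW n ((List.range' L c).foldl (fun m len =>
        (List.range (n - len)).foldl (fun m start =>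
          (List.range' start len).foldl (fun m k =>
            pvSet2 m start (start + len)
              (max (max (pvGet2 m start k + pvGet2 m (k + 1) (start + len))
                        (T.getD start 0 * T.getD (start + len) 0 + pvGet2 m (start + 1) (start + len - 1)))
                   (pvGet2 m start (start + len)))) m) m) m)
    ∧ ∀ i j, i < n → j < n →
      pvGet2 ((List.range' L c).foldl (fun m len =>
        (List.range (n - len)).foldl (fun m start =>
          (List.range' start len).foldl (fun m k =>
            pvSet2 m start (start + len)
              (max (max (pvGet2 m start k + pvGet2 m (k + 1) (start + len))
                        (T.getD start 0 * T.getD (start + len) 0 + pvGet2 m (start + 1) (start + len - 1)))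
                   (pvGet2 m start (start + len)))) m) m) m) i j = pvExpM T n (L + c) 0 i j := by
  intro c
  induction c with
  | zero =>
    intro L m _ _ hTW hm
    exact ⟨hTW, hm⟩
  | succ c ih =>
    intro L m hL hLc hTW hm
    rw [List.range'_succ]
    simp only [List.foldl_cons]
    obtain ⟨hTW1, hm1⟩ := pvMiddle T n L m hL (by omega) hTW hm
    have := ih (L + 1) _ (by omega) (by omega) hTW1 hm1
    rw [show L + 1 + c = L + (c + 1) from by omega] at this
    exact this

-- ===== VERDICT (by name: the statement is the Claim_ definition above) =====
theorem niby_trudniejsze_ale_w_sumie_latwe_kregle_spec : Claim_equal_niby_trudniejsze_ale_w_sumie_latwe_kregle := by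
  intro T _ hPre
  unfold Spec_niby_trudniejsze_ale_w_sumie_latwe_kregle
  simp only [niby_trudniejsze_ale_w_sumie_latwe_kregle, niby_trudniejsze_ale_w_sumie_latwe_kregle_alt]
  have hn1 : 1 ≤ T.length := by
    cases T with
    | nil => exact absurd rfl hPre
    | cons x t => simp
  by_cases hn2 : 2 ≤ T.length
  · obtain ⟨_, hB⟩ := pvOuterAux T T.length (T.length - 2) 2 _ (le_refl 2) (by omega)
      (pvInitTW T T.length) (fun i j hi hj => pvInit T T.length (by omega) i j hi hj)
    rw [show 2 + (T.length - 2) = T.length from by omega] at hB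
    rw [hB 0 (T.length - 1) (by omega) (by omega), pvExpM_def, if_pos (by omega)]
  · -- length 1 : the length loop is empty; the answer is the initial diagonal entry
    have hone : T.length = 1 := by omega
    rw [hone]
    rw [show List.range' 2 (1 - 2) = ([] : List Nat) from rfl]
    simp only [List.foldl_nil]
    rw [show (1 : Nat) - 1 = 0 from rfl]
    rw [pvInit T 1 (by omega) 0 0 (by omega) (by omega), pvExpM_def, if_pos (by omega)]
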